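-- pv_equiv track=rewrite | github.com/njd87/statarchive | secret santa/simulation.py | check_symmetric
-- ===== SOURCE A (Python) =====
-- def check_symmetric(assignment):
--     total = 0
--     seen = set()
--
--     for i,j in assignment.items():
--         if assignment[j] == i and j not in seen:
--             seen.add(i)
--             total += 1
--
--     return total
-- ===== SOURCE B (Python) =====
-- def check_symmetric(assignment):
--     # Two staged counting passes, no seen-set and no loop state: each mutual
--     # pair {i, j} with i != j satisfies assignment[assignment[i]] == i in both
--     # directions (contributing 2 to sym), and each self-loop contributes 1 to
--     # sym and 1 to self_loops, so A's count of one per pair is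
--     # (sym + self_loops) // 2.  The lookup assignment[j] in the first pass
--     # raises KeyError on a value that is not a key, exactly as A does.
--     sym = sum(1 for i, j in assignment.items() if assignment[j] == i)
--     self_loops = sum(1 for i, j in assignment.items() if i == j)
--     return (sym + self_loops) // 2
-- ===== Notes on version B (the rewrite author's own statement) =====
-- stated objective: simpler
-- what changed: Replaces A's single stateful loop with a seen-set by two stateless counting passes (count entries with assignment[assignment[i]]==i, count self-loops) combined by the closed identity (sym + self_loops) // 2.
import Mathlib
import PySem

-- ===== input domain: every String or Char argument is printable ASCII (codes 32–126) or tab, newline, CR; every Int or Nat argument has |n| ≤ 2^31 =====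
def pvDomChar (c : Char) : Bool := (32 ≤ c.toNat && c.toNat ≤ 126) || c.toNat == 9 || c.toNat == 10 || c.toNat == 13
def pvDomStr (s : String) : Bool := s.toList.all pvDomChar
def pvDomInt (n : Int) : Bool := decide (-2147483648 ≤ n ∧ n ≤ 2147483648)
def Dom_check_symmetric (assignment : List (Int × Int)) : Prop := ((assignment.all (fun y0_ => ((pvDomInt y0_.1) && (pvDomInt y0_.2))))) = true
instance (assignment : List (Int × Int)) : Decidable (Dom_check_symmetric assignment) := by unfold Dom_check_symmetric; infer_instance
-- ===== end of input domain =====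

-- B replaces A's stateful seen-set loop by two stateless counting passes combined
-- by the identity (sym + self_loops) // 2; objective: simpler (no speed claim).

-- ===== PORT A =====
-- loop body of A: 'if assignment[j] == i and j not in seen: seen.add(i); total += 1'
-- (a value j that is not a key is a Python KeyError: get? = none, excluded by Pre_)
def check_symmetric_step (assignment : List (Int × Int)) (st : Int × PySem.Set Int)
    (ij : Int × Int) : Int × PySem.Set Int :=
  match PySem.Dict.get? (PySem.Dict.mk assignment) ij.2 with
  | some v =>
      if v == ij.1 && !(PySem.Set.contains st.2 ij.2) then
        (st.1 + 1, PySem.Set.add st.2 ij.1)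
      else st
  | none => st

def check_symmetric (assignment : List (Int × Int)) : Int :=
  (assignment.foldl (check_symmetric_step assignment) (0, PySem.Set.empty)).1

-- ===== PORT B =====
-- Source B: sym = sum(1 for i,j in items if assignment[j] == i);
--       self_loops = sum(1 for i,j in items if i == j); return (sym+self_loops)//2
-- (the missing-key lookup is a Python KeyError; those inputs are excluded by Pre_)
def check_symmetric_alt (assignment : List (Int × Int)) : Int :=
  let sym : Nat := assignment.countP
    (fun p => PySem.Dict.get? (PySem.Dict.mk assignment) p.2 == some p.1)
  let self_loops : Nat := assignment.countP (fun p => p.1 == p.2)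
  PySem.Int.floordiv ((sym : Int) + (self_loops : Int)) 2

-- ===== PRECONDITION & SPEC =====
-- The association list stands for the Python dict 'assignment', so its keys must
-- be pairwise distinct; and every value must itself be a key, since assignment[j]
-- raises KeyError otherwise (both A and B raise on exactly those inputs).
def Pre_check_symmetric (assignment : List (Int × Int)) : Prop :=
  (assignment.map Prod.fst).Nodup ∧ ∀ p ∈ assignment, ∃ q ∈ assignment, q.1 = p.2
instance (assignment : List (Int × Int)) : Decidable (Pre_check_symmetric assignment) := by
  unfold Pre_check_symmetric; infer_instance

def pvWitness_check_symmetric : (List (Int × Int)) := [(1, 2), (2, 1), (3, 3), (4, 1)]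

def Spec_check_symmetric (assignment : List (Int × Int)) (out : Int) : Prop := out = check_symmetric_alt assignment
instance (assignment : List (Int × Int)) (out : Int) : Decidable (Spec_check_symmetric assignment out) := by unfold Spec_check_symmetric; infer_instance

-- ===== CLAIM (what is proved, stated in full; the proofs are below) =====
def Claim_equal_check_symmetric : Prop := ∀ (assignment : List (Int × Int)), Dom_check_symmetric assignment → Pre_check_symmetric assignment → Spec_check_symmetric assignment (check_symmetric assignment)

-- ===== LEMMAS AND PROOFS =====

def pvF (d : List (Int × Int)) (j : Int) : Option Int :=
  PySem.Dict.get? (PySem.Dict.mk d) j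

def pvM (d : List (Int × Int)) (p : Int × Int) : Bool :=
  pvF d p.2 == some p.1

def pvBC (d pre : List (Int × Int)) : Nat :=
  pre.countP (fun q => pvM d q && !(q.1 == q.2) && !(pre.contains (q.2, q.1)))

lemma pvF_of_mem {d : List (Int × Int)} (hnd : (d.map Prod.fst).Nodup)
    {p : Int × Int} (hp : p ∈ d) : pvF d p.1 = some p.2 := by
  have : (PySem.Dict.mk d).keys.Nodup := by simpa [PySem.Dict.keys_mk] using hnd
  exact (PySem.Dict.get?_eq_some_iff_mem_items _ _ _ this).2 hp

lemma mem_of_pvF {d : List (Int × Int)} {j v : Int} (h : pvF d j = some v) : (j, v) ∈ d :=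
  PySem.Dict.mem_items_of_get?_eq_some _ h

lemma pv_key_unique {d : List (Int × Int)} (hnd : (d.map Prod.fst).Nodup)
    {x y y' : Int} (h1 : (x, y) ∈ d) (h2 : (x, y') ∈ d) : y = y' := by
  have := List.inj_on_of_nodup_map hnd h1 h2 rfl
  exact congrArg Prod.snd this

lemma pvBC_snoc_not_rev (d pre : List (Int × Int)) (i j : Int)
    (hji : (j, i) ∉ pre) (hij : (i, j) ∉ pre) :
    pvBC d (pre ++ [(i, j)]) = pvBC d pre + (if pvM d (i, j) ∧ i ≠ j then 1 else 0) := by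
  unfold pvBC
  rw [List.countP_append]
  have hcongr : ∀ q ∈ pre,
      (pvM d q && !(q.1 == q.2) && !((pre ++ [(i, j)]).contains (q.2, q.1)))
        = (pvM d q && !(q.1 == q.2) && !(pre.contains (q.2, q.1))) := by
    intro q hq
    by_cases h : (q.2, q.1) = (i, j)
    · exfalso
      have hq1 : q = (j, i) := by
        have h1 : q.2 = i := congrArg Prod.fst h
        have h2 : q.1 = j := congrArg Prod.snd h
        cases q; simp_all
      exact hji (hq1 ▸ hq)
    · have hmem : ((q.2, q.1) ∈ pre ++ [(i, j)]) ↔ ((q.2, q.1) ∈ pre) := by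
        simp [List.mem_append, h]
      simp [List.contains_eq_mem, hmem]
  rw [List.countP_congr (fun q hq => by rw [hcongr q hq])]
  congr 1
  by_cases hne : i = j
  · subst hne
    simp [List.countP_cons, List.contains_eq_mem]
  · have hmem : ¬ ((j, i) ∈ pre ++ [(i, j)]) := by
      simp [List.mem_append, hji, Prod.ext_iff]
      omega
    by_cases hM : pvM d (i, j) = true <;>
      simp [List.countP_cons, List.contains_eq_mem, hmem, hji, hM, hne, Ne.symm hne]

lemma pvBC_snoc_rev (d pre : List (Int × Int)) (i j : Int)
    (hrev : (j, i) ∈ pre) (hM : pvM d (j, i) = true) (hne : i ≠ j)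
    (hnodup : pre.Nodup) (hij : (i, j) ∉ pre) :
    pvBC d (pre ++ [(i, j)]) + 1 = pvBC d pre := by
  obtain ⟨l1, l2, rfl⟩ := List.append_of_mem hrev
  have hmid := (List.nodup_middle.mp hnodup)
  rw [List.nodup_cons] at hmid
  have hji1 : (j, i) ∉ l1 := fun h => hmid.1 (List.mem_append.mpr (Or.inl h))
  have hji2 : (j, i) ∉ l2 := fun h => hmid.1 (List.mem_append.mpr (Or.inr h))
  have key : ∀ q, q ∈ l1 ∨ q ∈ l2 →
      (pvM d q && !(q.1 == q.2) && !(((l1 ++ (j, i) :: l2) ++ [(i, j)]).contains (q.2, q.1)))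
        = (pvM d q && !(q.1 == q.2) && !((l1 ++ (j, i) :: l2).contains (q.2, q.1))) := by
    intro q hq
    by_cases h : (q.2, q.1) = (i, j)
    · exfalso
      have hq1 : q = (j, i) := by
        have h1 : q.2 = i := congrArg Prod.fst h
        have h2 : q.1 = j := congrArg Prod.snd h
        cases q; simp_all
      subst hq1
      rcases hq with h' | h' <;> [exact hji1 h'; exact hji2 h']
    · have h2 : q.2 ≠ i ∨ q.1 ≠ j := by
        by_cases h1 : q.2 = i
        · right; intro h3; exact h (Prod.ext h1 h3)
        · left; exact h1
      rcases h2 with h2 | h2 <;> simp [List.contains_eq_mem, h2]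
  have hPji_old : (pvM d (j, i) && !((j, i).1 == (j, i).2)
      && !((l1 ++ (j, i) :: l2).contains ((j, i).2, (j, i).1))) = true := by
    have : ((i, j) ∈ l1 ++ (j, i) :: l2) = False := by simp [hij]
    simp [hM, List.contains_eq_mem, Ne.symm hne, hij]
  have hPji_new : (pvM d (j, i) && !((j, i).1 == (j, i).2)
      && !(((l1 ++ (j, i) :: l2) ++ [(i, j)]).contains ((j, i).2, (j, i).1))) = false := by
    simp [List.contains_eq_mem]
  have hPij_new : (pvM d (i, j) && !((i, j).1 == (i, j).2)
      && !(((l1 ++ (j, i) :: l2) ++ [(i, j)]).contains ((i, j).2, (i, j).1))) = false := by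
    simp [List.contains_eq_mem]
  unfold pvBC
  simp only [List.countP_append, List.countP_cons, List.countP_nil]
  rw [List.countP_congr (l := l1) (fun q hq => by rw [key q (Or.inl hq)]),
      List.countP_congr (l := l2) (fun q hq => by rw [key q (Or.inr hq)])]
  simp only [hPji_old, hPji_new, hPij_new]
  simp
  omega

lemma pvBC_self (d : List (Int × Int)) : pvBC d d = 0 := by
  unfold pvBC
  rw [List.countP_eq_zero]
  intro q hq
  by_cases hM : pvM d q = true
  · have : (q.2, q.1) ∈ d := by
      have := mem_of_pvF (of_eq_true (eq_true (beq_iff_eq.mp hM)))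
      exact this
    simp [hM, List.contains_eq_mem, this]
  · simp [Bool.not_eq_true] at hM
    simp [hM]

lemma pvA_loop (d : List (Int × Int)) (hnd : (d.map Prod.fst).Nodup) :
    ∀ (suf pre : List (Int × Int)) (t : Int) (seen : PySem.Set Int),
      d = pre ++ suf →
      (∀ x ∈ seen, ∃ y, (x, y) ∈ pre ∧ pvM d (x, y) = true) →
      (∀ x y, (x, y) ∈ pre → pvM d (x, y) = true → x ∈ seen ∨ y ∈ seen) →
      2 * t = (pre.countP (pvM d) : Int) + pre.countP (fun p => p.2 == p.1) + pvBC d pre →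
      2 * (suf.foldl (check_symmetric_step d) (t, seen)).1
        = (d.countP (pvM d) : Int) + d.countP (fun p => p.2 == p.1) + pvBC d d := by
  intro suf
  induction suf with
  | nil =>
      intro pre t seen hd _ _ ht
      simp only [List.append_nil] at hd
      subst hd
      simpa using ht
  | cons p suf' ih =>
      intro pre t seen hd hseen_mem hseen_cov ht
      obtain ⟨i, j⟩ := p
      have hmem_cur : (i, j) ∈ d := by rw [hd]; simp
      have hdn : d.Nodup := List.Nodup.of_map _ hnd
      have hcur_notin : (i, j) ∉ pre := by
        rw [hd] at hdn
        intro h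
        rcases List.disjoint_of_nodup_append hdn h (by simp)
      have hK2 : ∀ x, (i, x) ∉ pre := by
        intro x hx
        have hxd : (i, x) ∈ d := by rw [hd]; exact List.mem_append.mpr (Or.inl hx)
        have := pv_key_unique hnd hxd hmem_cur
        subst this
        exact hcur_notin hx
      have hfi : pvF d i = some j := pvF_of_mem hnd hmem_cur
      have hd' : d = (pre ++ [(i, j)]) ++ suf' := by simp [hd]
      simp only [List.foldl_cons]
      -- unfold one step of A
      rcases hC : PySem.Dict.get? (PySem.Dict.mk d) j with _ | v
      · -- KeyError case is impossible to be a counted entry: state unchanged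
        have hCf : pvF d j = none := hC
        have hne : i ≠ j := by
          intro h; rw [h] at hfi; rw [hfi] at hCf; simp at hCf
        have hji_not : (j, i) ∉ pre := by
          intro h
          have : pvF d j = some i :=
            pvF_of_mem hnd (by rw [hd]; exact List.mem_append.mpr (Or.inl h))
          rw [this] at hCf; simp at hCf
        have hMij : pvM d (i, j) = false := by simp [pvM, hCf]
        have hstep : check_symmetric_step d (t, seen) (i, j) = (t, seen) := by
          simp [check_symmetric_step, hC]
        rw [hstep]
        refine ih (pre ++ [(i, j)]) t seen hd' ?_ ?_ ?_
        · intro x hx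
          obtain ⟨y, hy, hMy⟩ := hseen_mem x hx
          exact ⟨y, List.mem_append.mpr (Or.inl hy), hMy⟩
        · intro x y hxy hMxy
          rcases List.mem_append.mp hxy with h | h
          · exact hseen_cov x y h hMxy
          · simp at h
            obtain ⟨rfl, rfl⟩ := h
            rw [hMij] at hMxy; exact Bool.noConfusion hMxy
        · rw [List.countP_append, List.countP_append,
              pvBC_snoc_not_rev d pre i j hji_not hcur_notin]
          have h1 : List.countP (pvM d) [(i, j)] = 0 := by simp [hMij]
          have h2 : List.countP (fun p => p.2 == p.1) [(i, j)] = 0 := by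
            simp [Ne.symm hne]
          rw [h1, h2, if_neg (by simp [hMij])]
          push_cast
          omega
      · have hCf : pvF d j = some v := hC
        by_cases hv : v = i
        · -- symmetric entry
          replace hCf : pvF d j = some i := by rw [hCf, hv]
          have hMij : pvM d (i, j) = true := by simp [pvM, hCf]
          have hMji : pvM d (j, i) = true := by simp [pvM, hfi]
          have hrev_d : (j, i) ∈ d := mem_of_pvF hCf
          have hseen_iff : seen.contains j = true ↔ (j, i) ∈ pre := by
            constructor
            · intro h
              obtain ⟨y, hy, hMy⟩ := hseen_mem j ((PySem.Set.contains_iff _ _).mp h)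
              have hyd : (j, y) ∈ d := by rw [hd]; exact List.mem_append.mpr (Or.inl hy)
              have := pv_key_unique hnd hyd hrev_d
              subst this
              exact hy
            · intro h
              rcases hseen_cov j i h hMji with h' | h'
              · exact (PySem.Set.contains_iff _ _).mpr h'
              · obtain ⟨y, hy, _⟩ := hseen_mem i h'
                exact absurd hy (hK2 y)
          by_cases hjp : (j, i) ∈ pre
          · -- second half of an already-counted pair: skipped
            have hne : i ≠ j := by
              intro h; rw [← h] at hjp; exact hK2 i hjp
            have hsc : seen.contains j = true := hseen_iff.mpr hjp
            have hscm : j ∈ seen := (PySem.Set.contains_iff _ _).mp hsc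
            have hstep : check_symmetric_step d (t, seen) (i, j) = (t, seen) := by
              simp [check_symmetric_step, hC, hv, hsc, hscm]
            rw [hstep]
            refine ih (pre ++ [(i, j)]) t seen hd' ?_ ?_ ?_
            · intro x hx
              obtain ⟨y, hy, hMy⟩ := hseen_mem x hx
              exact ⟨y, List.mem_append.mpr (Or.inl hy), hMy⟩
            · intro x y hxy hMxy
              rcases List.mem_append.mp hxy with h | h
              · exact hseen_cov x y h hMxy
              · simp at h
                obtain ⟨rfl, rfl⟩ := h
                exact Or.inr ((PySem.Set.contains_iff _ _).mp hsc)
            · have hpre_nodup : pre.Nodup := by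
                rw [hd] at hdn; exact (List.nodup_append.mp hdn).1
              have hbc := pvBC_snoc_rev d pre i j hjp hMji hne hpre_nodup hcur_notin
              rw [List.countP_append, List.countP_append]
              have h1 : List.countP (pvM d) [(i, j)] = 1 := by simp [hMij]
              have h2 : List.countP (fun p => p.2 == p.1) [(i, j)] = 0 := by
                simp [Ne.symm hne]
              rw [h1, h2]
              push_cast
              omega
          · -- first half of a pair (or a self-loop): counted
            have hsc : seen.contains j = false := by
              rw [← Bool.not_eq_true]
              intro h; exact hjp (hseen_iff.mp h)
            have hscm : j ∉ seen := fun h => hjp (hseen_iff.mp ((PySem.Set.contains_iff _ _).mpr h))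
            have hstep : check_symmetric_step d (t, seen) (i, j)
                = (t + 1, seen.add i) := by
              simp [check_symmetric_step, hC, hv, hsc, hscm]
            rw [hstep]
            refine ih (pre ++ [(i, j)]) (t + 1) (seen.add i) hd' ?_ ?_ ?_
            · intro x hx
              rcases (PySem.Set.mem_add _ _ _).mp hx with h | rfl
              · obtain ⟨y, hy, hMy⟩ := hseen_mem x h
                exact ⟨y, List.mem_append.mpr (Or.inl hy), hMy⟩
              · exact ⟨j, List.mem_append.mpr (Or.inr (by simp)), hMij⟩
            · intro x y hxy hMxy
              rcases List.mem_append.mp hxy with h | h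
              · rcases hseen_cov x y h hMxy with h' | h'
                · exact Or.inl ((PySem.Set.mem_add _ _ _).mpr (Or.inl h'))
                · exact Or.inr ((PySem.Set.mem_add _ _ _).mpr (Or.inl h'))
              · simp at h
                obtain ⟨rfl, rfl⟩ := h
                exact Or.inl ((PySem.Set.mem_add _ _ _).mpr (Or.inr rfl))
            · rw [List.countP_append, List.countP_append,
                  pvBC_snoc_not_rev d pre i j hjp hcur_notin]
              have h1 : List.countP (pvM d) [(i, j)] = 1 := by simp [hMij]
              by_cases hii : i = j
              · have h2 : List.countP (fun p => p.2 == p.1) [(i, j)] = 1 := by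
                  simp [hii]
                rw [h1, h2, if_neg (by simp [hii])]
                push_cast
                omega
              · have h2 : List.countP (fun p => p.2 == p.1) [(i, j)] = 0 := by
                  simp [Ne.symm hii]
                rw [h1, h2, if_pos ⟨hMij, hii⟩]
                push_cast
                omega
        · -- assignment[j] != i : state unchanged
          have hMij : pvM d (i, j) = false := by simp [pvM, hCf, hv]
          have hne : i ≠ j := by
            intro h; rw [h] at hfi
            rw [hfi] at hCf
            exact hv (by injection hCf with h'; omega)
          have hji_not : (j, i) ∉ pre := by
            intro h
            have : pvF d j = some i :=
              pvF_of_mem hnd (by rw [hd]; exact List.mem_append.mpr (Or.inl h))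
            rw [this] at hCf
            exact hv (by injection hCf with h'; omega)
          have hstep : check_symmetric_step d (t, seen) (i, j) = (t, seen) := by
            simp [check_symmetric_step, hC, hv]
          rw [hstep]
          refine ih (pre ++ [(i, j)]) t seen hd' ?_ ?_ ?_
          · intro x hx
            obtain ⟨y, hy, hMy⟩ := hseen_mem x hx
            exact ⟨y, List.mem_append.mpr (Or.inl hy), hMy⟩
          · intro x y hxy hMxy
            rcases List.mem_append.mp hxy with h | h
            · exact hseen_cov x y h hMxy
            · simp at h
              obtain ⟨rfl, rfl⟩ := h
              rw [hMij] at hMxy; exact Bool.noConfusion hMxy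
          · rw [List.countP_append, List.countP_append,
                pvBC_snoc_not_rev d pre i j hji_not hcur_notin]
            have h1 : List.countP (pvM d) [(i, j)] = 0 := by simp [hMij]
            have h2 : List.countP (fun p => p.2 == p.1) [(i, j)] = 0 := by
              simp [Ne.symm hne]
            rw [h1, h2, if_neg (by simp [hMij])]
            push_cast
            omega

-- the self-loop predicates of the two ports count the same entries
lemma pv_self_count (d : List (Int × Int)) :
    d.countP (fun p => p.1 == p.2) = d.countP (fun p => p.2 == p.1) := by
  apply List.countP_congr
  intro p _
  by_cases h : p.1 = p.2 <;> simp [h, Ne.symm]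

-- ===== VERDICT (by name: the statement is the Claim_ definition above) =====
theorem check_symmetric_spec : Claim_equal_check_symmetric := by
  intro d _ hpre
  obtain ⟨hnd, -⟩ := hpre
  show check_symmetric d = check_symmetric_alt d
  have hA := pvA_loop d hnd d [] 0 PySem.Set.empty (by simp)
    (by intro x hx; simp [PySem.Set.empty] at hx)
    (by intro x y hxy; simp at hxy)
    (by simp [pvBC])
  rw [pvBC_self] at hA
  unfold check_symmetric_alt
  have hsym : d.countP
      (fun p => PySem.Dict.get? (PySem.Dict.mk d) p.2 == some p.1)
      = d.countP (pvM d) := rfl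
  rw [hsym, pv_self_count]
  unfold check_symmetric
  rw [PySem.Int.floordiv_eq_ediv_of_pos (by norm_num)]
  omega
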